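-- pv_equiv track=rewrite | github.com/mikedh/trimesh | trimesh/rle.py | sorted_rle_gather_1d
-- ===== SOURCE A (Python) =====
-- def sorted_rle_gather_1d(rle_data, ordered_indices):
--     """
--     Gather brle_data at ordered_indices.
--
--     This is equivalent to `rle_to_dense(brle_data)[ordered_indices]` but avoids
--     the decoding.
--
--     Args:
--         brle_data: iterable of run-length-encoded data.
--         ordered_indices: iterable of ints in ascending order.
--
--     Returns:
--         `brle_data` iterable of values at the dense indices, same length as
--         ordered indices.
--     """
--     data_iter = iter(rle_data)
--     index_iter = iter(ordered_indices)
--     index = next(index_iter)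
--     start = 0
--     while True:
--         while start <= index:
--             try:
--                 value = next(data_iter)
--                 start += next(data_iter)
--             except StopIteration:
--                 raise IndexError(
--                     'Index %d out of range of raw_values length %d'
--                     % (index, start))
--         try:
--             while index < start:
--                 yield value
--                 index = next(index_iter)
--         except StopIteration:
--             break
-- ===== SOURCE B (Python) =====
-- def sorted_rle_gather_1d(rle_data, ordered_indices):
--     """Gather dense values of run-length-encoded data at ascending indices.
--
--     Decodes rle_data once into parallel lists of run values and cumulative
--     run ends (prefix sums of the lengths), then serves the indices with a
--     cursor over the runs that only ever moves forward, since the indices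
--     are ascending.
--     """
--     values = []
--     ends = []
--     total = 0
--     it = iter(rle_data)
--     for value in it:
--         length = next(it, None)
--         if length is None:
--             break
--         total += length
--         values.append(value)
--         ends.append(total)
--     pos = 0
--     start = 0
--     for index in ordered_indices:
--         while start <= index:
--             if pos == len(ends):
--                 raise IndexError(
--                     'Index %d out of range of raw_values length %d'
--                     % (index, start))
--             start = ends[pos]
--             pos += 1
--         yield values[pos - 1]
-- ===== Notes on version B (the rewrite author's own statement) =====
-- stated objective: alternative
-- what changed: Replaces A's single interleaved scan of the two iterators (pulling value/length pairs on demand inside the index loop, carrying a possibly-unbound current value) by decoding the runs once into parallel lists of run values and cumulative run ends and then serving the indices with a forward-moving cursor over those arrays; Pre_ excludes exactly the inputs on which A raises (empty indices -> RuntimeError, negative first index -> UnboundLocalError, an index no cumulative run end exceeds -> IndexError).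
import Mathlib
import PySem

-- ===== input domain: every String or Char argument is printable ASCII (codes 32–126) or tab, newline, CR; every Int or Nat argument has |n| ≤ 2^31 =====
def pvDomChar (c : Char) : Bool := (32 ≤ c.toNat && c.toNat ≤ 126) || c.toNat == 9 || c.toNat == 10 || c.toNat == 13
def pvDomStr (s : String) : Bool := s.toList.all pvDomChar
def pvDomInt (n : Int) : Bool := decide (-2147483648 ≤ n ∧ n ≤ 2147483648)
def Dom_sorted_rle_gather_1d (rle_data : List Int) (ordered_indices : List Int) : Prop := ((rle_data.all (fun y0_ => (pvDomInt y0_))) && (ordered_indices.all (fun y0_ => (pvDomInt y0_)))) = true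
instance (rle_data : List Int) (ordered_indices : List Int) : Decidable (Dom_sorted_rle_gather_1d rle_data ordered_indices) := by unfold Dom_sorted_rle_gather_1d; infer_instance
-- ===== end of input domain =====

-- B decodes the runs once into parallel lists of values and cumulative ends and serves the
-- indices with a forward-moving cursor over them, instead of A's interleaved consumption of
-- the two iterators; equivalence is about the RETURN value (both are Python generators; no
-- argument mutation).

-- ===== PORT A =====
-- A's outer `while True` with its two inner whiles, transliterated: `data` / `indices` are
-- the remaining iterators, `value` is Python's possibly-unbound local (none = unbound),
-- `none` result = an exception (IndexError / UnboundLocalError); excluded by Pre_.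
def pvGatherA (data indices : List Int) (index start : Int) (value : Option Int) (acc : List Int) : Option (List Int) :=
  if start ≤ index then
    match data with
    | v :: l :: ds => pvGatherA ds indices index (start + l) (some v) acc
    | _ => none            -- StopIteration → IndexError
  else
    match value with
    | none => none         -- UnboundLocalError (negative first index)
    | some v =>
      match indices with
      | [] => some (acc ++ [v])                         -- yield, then StopIteration → break
      | i :: is => pvGatherA data is i start (some v) (acc ++ [v])
  termination_by (data.length, indices.length)

def sorted_rle_gather_1d (rle_data : List Int) (ordered_indices : List Int) : List Int :=
  match ordered_indices with
  | [] => []               -- next(index_iter) raises → RuntimeError; excluded by Pre_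
  | i :: is => (pvGatherA rle_data is i 0 none []).getD []

-- ===== PORT B =====
-- first loop of Source B: consume rle_data in (value, length) pairs, building the run values
-- and the cumulative ends (a trailing lone element is dropped, as in Source B).
def pvRuns (data : List Int) (total : Int) : List Int × List Int :=
  match data with
  | v :: l :: rest =>
      let p := pvRuns rest (total + l)
      (v :: p.1, (total + l) :: p.2)
  | _ => ([], [])

-- second loop of Source B: the cursor `pos`/`start` advanced over the precomputed arrays;
-- `none` = an exception (the explicit IndexError, or values[pos-1] on an empty list).
def pvGatherB (values ends indices : List Int) (pos : Nat) (start : Int) (acc : List Int) : Option (List Int) :=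
  match indices with
  | [] => some acc
  | index :: is =>
    if start ≤ index then
      if ends.length ≤ pos then none                    -- raise IndexError
      else pvGatherB values ends (index :: is) (pos + 1) (ends.getD pos 0) acc
    else
      match PySem.List.pyGet? values ((pos : Int) - 1) with
      | none => none                                    -- values[-1] on empty values
      | some v => pvGatherB values ends is pos start (acc ++ [v])
  termination_by (ends.length - pos, indices.length)
  decreasing_by all_goals simp_wf; omega

def sorted_rle_gather_1d_alt (rle_data : List Int) (ordered_indices : List Int) : List Int :=
  let p := pvRuns rle_data 0
  (pvGatherB p.1 p.2 ordered_indices 0 0 []).getD []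

-- ===== PRECONDITION & SPEC =====
-- cumulative run ends of the encoding (prefix sums of every second element)
def pvEnds : List Int → Int → List Int
  | _ :: l :: rest, t => (t + l) :: pvEnds rest (t + l)
  | _, _ => []

-- Pre_ is exactly the set of inputs on which A returns normally: a nonempty index list
-- whose first index is non-negative and each of whose indices lies below some cumulative
-- run end. Outside it A raises: RuntimeError on empty indices, UnboundLocalError on a
-- negative first index, IndexError on an index the runs never pass.
def Pre_sorted_rle_gather_1d (rle_data : List Int) (ordered_indices : List Int) : Prop :=
  ordered_indices ≠ [] ∧
  0 ≤ ordered_indices.headD 0 ∧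
  (∀ i ∈ ordered_indices, ∃ e ∈ pvEnds rle_data 0, i < e)
instance (rle_data : List Int) (ordered_indices : List Int) : Decidable (Pre_sorted_rle_gather_1d rle_data ordered_indices) := by unfold Pre_sorted_rle_gather_1d; infer_instance

def pvWitness_sorted_rle_gather_1d : List Int × List Int := ([1, 2, 3, 1], [0, 1, 2])

def Spec_sorted_rle_gather_1d (rle_data : List Int) (ordered_indices : List Int) (out : List Int) : Prop := out = sorted_rle_gather_1d_alt rle_data ordered_indices
instance (rle_data : List Int) (ordered_indices : List Int) (out : List Int) : Decidable (Spec_sorted_rle_gather_1d rle_data ordered_indices out) := by unfold Spec_sorted_rle_gather_1d; infer_instance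

-- ===== CLAIM (what is proved, stated in full; the proofs are below) =====
def Claim_equal_sorted_rle_gather_1d : Prop := ∀ (rle_data : List Int) (ordered_indices : List Int), Dom_sorted_rle_gather_1d rle_data ordered_indices → Pre_sorted_rle_gather_1d rle_data ordered_indices → Spec_sorted_rle_gather_1d rle_data ordered_indices (sorted_rle_gather_1d rle_data ordered_indices)

-- ===== LEMMAS AND PROOFS =====

lemma pvRuns_lengths : ∀ (data : List Int) (t : Int), (pvRuns data t).1.length = (pvRuns data t).2.length := by
  intro data t
  induction data, t using pvRuns.induct with
  | case1 v l rest t ih => simp [pvRuns, ih]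
  | case2 d t hshape =>
      cases d with
      | nil => simp [pvRuns]
      | cons a tl => cases tl with
        | nil => simp [pvRuns]
        | cons b tl2 => exact absurd rfl (hshape a b tl2)

-- unfolding equations for pvGatherA's branches
lemma pvGatherA_consume (indices : List Int) (index start : Int) (value : Option Int)
    (acc : List Int) (v l : Int) (ds : List Int) (h : start ≤ index) :
    pvGatherA (v :: l :: ds) indices index start value acc
      = pvGatherA ds indices index (start + l) (some v) acc := by
  rw [pvGatherA.eq_def]; simp [h]

lemma pvGatherA_yield_nil (data : List Int) (index start : Int) (v : Int)
    (acc : List Int) (h : ¬ start ≤ index) :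
    pvGatherA data [] index start (some v) acc = some (acc ++ [v]) := by
  rw [pvGatherA.eq_def]; simp [h]

lemma pvGatherA_yield_cons (data : List Int) (index start : Int) (v i : Int)
    (is acc : List Int) (h : ¬ start ≤ index) :
    pvGatherA data (i :: is) index start (some v) acc
      = pvGatherA data is i start (some v) (acc ++ [v]) := by
  rw [pvGatherA.eq_def]; simp [h]

-- unfolding equations for pvGatherB's branches
lemma pvGatherB_nil (V E : List Int) (pos : Nat) (start : Int) (acc : List Int) :
    pvGatherB V E [] pos start acc = some acc := by
  rw [pvGatherB]

lemma pvGatherB_consume (V E is : List Int) (index start : Int) (pos : Nat) (acc : List Int)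
    (h : start ≤ index) (h2 : ¬ E.length ≤ pos) :
    pvGatherB V E (index :: is) pos start acc
      = pvGatherB V E (index :: is) (pos + 1) (E.getD pos 0) acc := by
  rw [pvGatherB, if_pos h, if_neg h2]

lemma pvGatherB_raise (V E is : List Int) (index start : Int) (pos : Nat) (acc : List Int)
    (h : start ≤ index) (h2 : E.length ≤ pos) :
    pvGatherB V E (index :: is) pos start acc = none := by
  rw [pvGatherB, if_pos h, if_pos h2]

lemma pvGatherB_yield (V E is : List Int) (index start : Int) (pos : Nat) (acc : List Int)
    (v : Int) (h : ¬ start ≤ index) (hv : PySem.List.pyGet? V ((pos : Int) - 1) = some v) :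
    pvGatherB V E (index :: is) pos start acc = pvGatherB V E is pos start (acc ++ [v]) := by
  rw [pvGatherB, if_neg h, hv]

-- bisimulation between A's interleaved scan and B's cursor over the precomputed arrays:
-- `pos` pairs have been consumed, the unconsumed part of the data decodes to the suffixes
-- of V and E at pos, and A's current `value` is V[pos-1] once anything was consumed.
lemma gather_bisim (V E : List Int) (hVE : V.length = E.length) :
    ∀ (data indices : List Int) (index start : Int) (value : Option Int) (acc : List Int),
    ∀ pos : Nat,
    (pvRuns data start).1 = V.drop pos →
    (pvRuns data start).2 = E.drop pos →
    ((pos = 0 ∧ value = none ∧ start = 0 ∧ 0 ≤ index) ∨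
      (1 ≤ pos ∧ pos ≤ E.length ∧ value = some (V.getD (pos - 1) 0))) →
    pvGatherA data indices index start value acc
      = pvGatherB V E (index :: indices) pos start acc := by
  intro data indices index start value acc
  induction data, indices, index, start, value, acc using pvGatherA.induct with
  | case1 indices index start value acc hle v l ds ih =>
      intro pos h1 h2 hval
      simp only [pvRuns] at h1 h2
      have hpos : pos < E.length := by
        by_contra hge
        rw [List.drop_eq_nil_of_le (by omega)] at h2
        exact absurd h2 (by simp)
      have hEpos : E[pos]? = some (start + l) := by
        have h := congrArg (fun xs : List Int => xs[0]?) h2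
        simpa using h.symm
      have hVpos : V[pos]? = some v := by
        have h := congrArg (fun xs : List Int => xs[0]?) h1
        simpa using h.symm
      have hgetD : E.getD pos 0 = start + l := by
        rw [List.getD_eq_getElem?_getD, hEpos]; rfl
      rw [pvGatherA_consume _ _ _ _ _ _ _ _ hle,
          pvGatherB_consume _ _ _ _ _ _ _ hle (by omega), hgetD]
      apply ih
      · simpa [List.tail_drop] using congrArg List.tail h1
      · simpa [List.tail_drop] using congrArg List.tail h2
      · right
        refine ⟨by omega, by omega, ?_⟩
        have hg : V.getD (pos + 1 - 1) 0 = v := by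
          rw [show pos + 1 - 1 = pos from rfl, List.getD_eq_getElem?_getD, hVpos]; rfl
        rw [hg]
  | case2 data indices index start value acc hle hshape =>
      intro pos h1 h2 hval
      have hruns : (pvRuns data start).2 = [] := by
        cases data with
        | nil => simp [pvRuns]
        | cons a tl => cases tl with
          | nil => simp [pvRuns]
          | cons b tl2 => exact absurd rfl (hshape a b tl2)
      rw [hruns] at h2
      have hge : E.length ≤ pos := by
        by_contra hlt
        have hne : E.drop pos ≠ [] := by
          apply List.ne_nil_of_length_pos
          rw [List.length_drop]
          omega
        exact hne h2.symm
      rw [pvGatherB_raise _ _ _ _ _ _ _ hle hge, pvGatherA.eq_def]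
      cases data with
      | nil => simp [hle]
      | cons a tl => cases tl with
        | nil => simp [hle]
        | cons b tl2 => exact absurd rfl (hshape a b tl2)
  | case3 data indices index start acc hle =>
      intro pos h1 h2 hval
      rcases hval with ⟨_, _, rfl, hidx⟩ | ⟨_, _, hsome⟩
      · omega
      · exact absurd hsome (by simp)
  | case4 data index start acc hle v =>
      intro pos h1 h2 hval
      rcases hval with ⟨_, hnone, _, _⟩ | ⟨hpos1, hposE, hsome⟩
      · exact absurd hnone (by simp)
      · obtain rfl : v = V.getD (pos - 1) 0 := by injection hsome
        have hrange : pos - 1 < V.length := by omega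
        have hcast : (pos : Int) - 1 = ((pos - 1 : Nat) : Int) := by omega
        have hv : PySem.List.pyGet? V ((pos : Int) - 1) = some (V.getD (pos - 1) 0) := by
          rw [hcast, PySem.List.pyGet?_natCast, List.getElem?_eq_getElem hrange,
              List.getD_eq_getElem?_getD, List.getElem?_eq_getElem hrange]
          rfl
        rw [pvGatherA_yield_nil _ _ _ _ _ hle, pvGatherB_yield _ _ _ _ _ _ _ _ hle hv,
            pvGatherB_nil]
  | case5 data index start acc hle v i is ih =>
      intro pos h1 h2 hval
      rcases hval with ⟨_, hnone, _, _⟩ | ⟨hpos1, hposE, hsome⟩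
      · exact absurd hnone (by simp)
      · obtain rfl : v = V.getD (pos - 1) 0 := by injection hsome
        have hrange : pos - 1 < V.length := by omega
        have hcast : (pos : Int) - 1 = ((pos - 1 : Nat) : Int) := by omega
        have hv : PySem.List.pyGet? V ((pos : Int) - 1) = some (V.getD (pos - 1) 0) := by
          rw [hcast, PySem.List.pyGet?_natCast, List.getElem?_eq_getElem hrange,
              List.getD_eq_getElem?_getD, List.getElem?_eq_getElem hrange]
          rfl
        rw [pvGatherA_yield_cons _ _ _ _ _ _ _ hle, pvGatherB_yield _ _ _ _ _ _ _ _ hle hv]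
        exact ih pos h1 h2 (Or.inr ⟨hpos1, hposE, rfl⟩)

-- ===== VERDICT (by name: the statement is the Claim_ definition above) =====
theorem sorted_rle_gather_1d_spec : Claim_equal_sorted_rle_gather_1d := by
  intro rle_data ordered_indices _hdom hpre
  obtain ⟨hne, hhead, _hbnd⟩ := hpre
  unfold Spec_sorted_rle_gather_1d
  cases ordered_indices with
  | nil => exact absurd rfl hne
  | cons idx is =>
      have hidx0 : 0 ≤ idx := by simpa using hhead
      have hmain := gather_bisim (pvRuns rle_data 0).1 (pvRuns rle_data 0).2
        (pvRuns_lengths rle_data 0) rle_data is idx 0 none [] 0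
        (by simp) (by simp) (Or.inl ⟨rfl, rfl, rfl, hidx0⟩)
      show (pvGatherA rle_data is idx 0 none []).getD []
          = (pvGatherB (pvRuns rle_data 0).1 (pvRuns rle_data 0).2 (idx :: is) 0 0 []).getD []
      rw [hmain]
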